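-- pv_equiv track=rewrite | github.com/django-ftl/django-ftl | src/django_ftl/bundles.py | locale_lookups
-- ===== SOURCE A (Python) =====
-- from collections import OrderedDict
--
-- def locale_lookups(locale):
--     """
--     Utility for implementing RFC 4647 lookup algorithm
--     """
--     if ',' in locale:
--         locales = [l.strip() for l in locale.split(",")]
--         return uniquify(sum(map(locale_lookups, locales), []))
--
--     parts = locale.split('-')
--     locales = []
--     current = None
--     for p in parts:
--         if current is None:
--             current = p
--             locales.append(current)
--         else:
--             current = current + "-" + p
--             if len(p) == 1:
--                 # Skip single letter/digit bits
--                 continue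
--             locales.append(current)
--
--     return list(reversed(locales))
--
-- def uniquify(l):
--     return list(OrderedDict.fromkeys(l))
-- ===== SOURCE B (Python) =====
-- def locale_lookups(locale):
--     """
--     Utility for implementing RFC 4647 lookup algorithm
--     """
--     if ',' in locale:
--         seen = set()
--         out = []
--         for piece in locale.split(','):
--             for loc in locale_lookups(piece.strip()):
--                 if loc not in seen:
--                     seen.add(loc)
--                     out.append(loc)
--         return out
--
--     parts = locale.split('-')
--     return ['-'.join(parts[:i + 1])
--             for i in reversed(range(len(parts)))
--             if i == 0 or len(parts[i]) != 1]
-- ===== Notes on version B (the rewrite author's own statement) =====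
-- stated objective: alternative
-- what changed: The single-locale branch drops the threaded `current` accumulator and rebuilds each fallback directly as a joined slice parts[:i+1] over reversed(range(len(parts))), and the comma branch replaces concat-all-then-uniquify with one dedup-while-merging pass over a shared seen set.
import Mathlib
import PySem

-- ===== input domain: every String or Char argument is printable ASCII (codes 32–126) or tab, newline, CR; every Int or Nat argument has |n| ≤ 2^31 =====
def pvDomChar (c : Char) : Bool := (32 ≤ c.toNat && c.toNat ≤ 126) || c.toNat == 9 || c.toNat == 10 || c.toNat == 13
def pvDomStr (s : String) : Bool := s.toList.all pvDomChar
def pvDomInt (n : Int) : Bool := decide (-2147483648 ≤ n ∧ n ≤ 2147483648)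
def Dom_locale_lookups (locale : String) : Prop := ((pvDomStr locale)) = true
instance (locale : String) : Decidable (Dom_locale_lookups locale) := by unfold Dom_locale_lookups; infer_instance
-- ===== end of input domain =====

-- B replaces A's threaded `current` accumulator by direct prefix slices built back-to-front,
-- and replaces concat-everything-then-uniquify by a single dedup-while-merging pass (objective: alternative).

-- ===== PORT A =====
-- one iteration of A's `for p in parts` loop (state: built list, `current`)
def stepA (st : List String × Option String) (p : String) : List String × Option String :=
  match st.2 with
  | none => (st.1 ++ [p], some p)
  | some cur =>
    let cur' := PySem.Str.join "-" [cur, p]       -- current + "-" + p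
    if PySem.Str.len p = 1 then (st.1, some cur') -- skip single letter/digit bits
    else (st.1 ++ [cur'], some cur')

-- Python A recurses on the pieces of locale.split(','); the recursion depth is bounded by the
-- string length, so the port threads a fuel argument (locale's length + 1) that is never exhausted.
def locale_lookupsF : Nat → String → List String
  | 0, _ => []
  | fuel+1, locale =>
    if PySem.Str.isIn "," locale then
      -- locales = [l.strip() for l in locale.split(",")]; return uniquify(sum(map(locale_lookups, locales), []))
      let locales := ((PySem.Str.split? locale ",").getD []).map PySem.Str.strip
      PySem.List.dedup ((locales.map (locale_lookupsF fuel)).foldl (fun acc x => acc ++ x) [])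
    else
      let parts := (PySem.Str.split? locale "-").getD []   -- sep "-" ≠ "", so split? is always `some`
      (parts.foldl stepA ([], none)).1.reverse

def locale_lookups (locale : String) : List String :=
  locale_lookupsF (locale.toList.length + 1) locale

-- ===== PORT B =====
-- one iteration of B's inner merge loop (state: `seen` set, `out` list)
def stepB (st : PySem.Set String × List String) (loc : String) : PySem.Set String × List String :=
  if st.1.contains loc then st else (st.1.add loc, st.2 ++ [loc])

-- Same fuel scheme for B's recursion on the comma pieces.
def locale_lookups_altF : Nat → String → List String
  | 0, _ => []
  | fuel+1, locale =>
    if PySem.Str.isIn "," locale then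
      -- seen = set(); out = []; nested loop appending first occurrences only
      (((PySem.Str.split? locale ",").getD []).foldl
        (fun st piece => (locale_lookups_altF fuel (PySem.Str.strip piece)).foldl stepB st)
        (PySem.Set.empty, [])).2
    else
      -- ['-'.join(parts[:i+1]) for i in reversed(range(len(parts))) if i == 0 or len(parts[i]) != 1]
      let parts := (PySem.Str.split? locale "-").getD []
      ((List.range parts.length).reverse.filter
        (fun i => i == 0 || !(PySem.Str.len (parts.getD i "") == 1))).map
        (fun i => PySem.Str.join "-" (parts.take (i+1)))   -- parts[:i+1] with i ≥ 0 is `take (i+1)`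

def locale_lookups_alt (locale : String) : List String :=
  locale_lookups_altF (locale.toList.length + 1) locale

-- ===== PRECONDITION & SPEC =====
def Spec_locale_lookups (locale : String) (out : List String) : Prop := out = locale_lookups_alt locale
instance (locale : String) (out : List String) : Decidable (Spec_locale_lookups locale out) := by unfold Spec_locale_lookups; infer_instance

-- ===== CLAIM (what is proved, stated in full; the proofs are below) =====
def Claim_equal_locale_lookups : Prop := ∀ (locale : String), Dom_locale_lookups locale → Spec_locale_lookups locale (locale_lookups locale)

-- ===== LEMMAS AND PROOFS =====

-- "-".join([ "-".join(pre), r ]) = "-".join(pre ++ [r]) for nonempty pre (char level)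
lemma charsJoin_snoc (sep r : List Char) (p : List Char) (l : List (List Char)) :
    PySem.Chars.join sep [PySem.Chars.join sep (p :: l), r]
      = PySem.Chars.join sep ((p :: l) ++ [r]) := by
  induction l generalizing p with
  | nil => simp [PySem.Chars.join_cons_cons]
  | cons q l ih =>
    have h := ih q
    simp only [List.cons_append, PySem.Chars.join_cons_cons, PySem.Chars.join_singleton] at h ⊢
    rw [← h]
    simp only [List.append_assoc]

-- the same on strings
lemma strJoin_snoc (p : String) (l : List String) (r : String) :
    PySem.Str.join "-" [PySem.Str.join "-" (p :: l), r]
      = PySem.Str.join "-" ((p :: l) ++ [r]) := by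
  apply String.toList_inj.mp
  simp only [PySem.Str.toList_join, List.map_cons, List.map_nil, List.map_append,
    PySem.Str.toList_join]
  exact charsJoin_snoc "-".toList r.toList p.toList (l.map String.toList)

lemma strJoin_singleton (p : String) : PySem.Str.join "-" [p] = p := by
  apply String.toList_inj.mp
  simp [PySem.Str.toList_join, PySem.Chars.join_singleton]

lemma stepA_some (acc : List String) (cur q : String) :
    stepA (acc, some cur) q
      = if PySem.Str.len q = 1 then (acc, some (PySem.Str.join "-" [cur, q]))
        else (acc ++ [PySem.Str.join "-" [cur, q]], some (PySem.Str.join "-" [cur, q])) := rfl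

-- A's single-locale loop characterised: starting after a nonempty prefix `pre = p :: l`,
-- the appended items are the joins of the prefixes whose last part is not single-char.
lemma foldA_char (rest : List String) :
    ∀ (p : String) (l acc : List String),
    rest.foldl stepA (acc, some (PySem.Str.join "-" (p :: l)))
    = (acc ++ ((List.range rest.length).filter
          (fun j => !(PySem.Str.len (rest.getD j "") == 1))).map
          (fun j => PySem.Str.join "-" ((p :: l) ++ rest.take (j+1))),
       some (PySem.Str.join "-" ((p :: l) ++ rest))) := by
  induction rest with
  | nil => intro p l acc; simp
  | cons r rs ih =>
    intro p l acc
    have hcond : ((fun j => !(PySem.Str.len ((r :: rs).getD j "") == 1)) ∘ Nat.succ)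
        = (fun j => !(PySem.Str.len (rs.getD j "") == 1)) := by
      funext j; simp
    have hfun : ((fun j => PySem.Str.join "-" ((p :: l) ++ (r :: rs).take (j+1))) ∘ Nat.succ)
        = (fun j => PySem.Str.join "-" ((p :: (l ++ [r])) ++ rs.take (j+1))) := by
      funext j; simp
    rw [List.foldl_cons, stepA_some, strJoin_snoc]
    by_cases h1 : PySem.Str.len r = 1
    · rw [if_pos h1, show (p :: l) ++ [r] = p :: (l ++ [r]) from rfl, ih p (l ++ [r]) acc]
      have hb : (PySem.Str.len r == 1) = true := by simpa using h1
      rw [List.length_cons, List.range_succ_eq_map, List.filter_cons, List.getD_cons_zero, hb]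
      simp only [Bool.not_true, Bool.false_eq_true, if_false, List.filter_map, List.map_map,
        hcond, hfun]
      simp
    · rw [if_neg h1, show (p :: l) ++ [r] = p :: (l ++ [r]) from rfl, ih p (l ++ [r])]
      have hb : (PySem.Str.len r == 1) = false := by simpa using h1
      rw [List.length_cons, List.range_succ_eq_map, List.filter_cons, List.getD_cons_zero, hb]
      simp only [Bool.not_false, if_true, List.filter_map, List.map_cons,
        List.map_map, hcond, hfun]
      simp

-- the single-locale (no comma) branches agree for any `parts`
lemma single_branch_eq (parts : List String) :
    (parts.foldl stepA ([], none)).1.reverse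
    = ((List.range parts.length).reverse.filter
        (fun i => i == 0 || !(PySem.Str.len (parts.getD i "") == 1))).map
        (fun i => PySem.Str.join "-" (parts.take (i+1))) := by
  cases parts with
  | nil => simp
  | cons p rest =>
    have hcond : ((fun i => i == 0 || !(PySem.Str.len ((p :: rest).getD i "") == 1)) ∘ Nat.succ)
        = (fun j => !(PySem.Str.len (rest.getD j "") == 1)) := by
      funext j; simp
    have hfun : ((fun i => PySem.Str.join "-" ((p :: rest).take (i+1))) ∘ Nat.succ)
        = (fun j => PySem.Str.join "-" ((p :: ([] : List String)) ++ rest.take (j+1))) := by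
      funext j; simp
    rw [List.foldl_cons]
    rw [show stepA (([] : List String), none) p = ([p], some (PySem.Str.join "-" (p :: []))) from by
      simp [stepA, strJoin_singleton]]
    rw [foldA_char rest p [] [p]]
    rw [List.filter_reverse, List.map_reverse]
    congr 1
    rw [List.length_cons, List.range_succ_eq_map, List.filter_cons]
    simp only [List.getD_cons_zero, beq_self_eq_true, Bool.true_or, if_true,
      List.filter_map, List.map_cons, List.map_map, hcond, hfun]
    simp [strJoin_singleton]

-- B's dedup-while-merging fold: when the set and the output list coincide, they stay equal
lemma foldB_dedup (l : List String) :
    ∀ (s : List String),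
    l.foldl stepB (s, s) = (PySem.Set.update s l, PySem.Set.update s l) := by
  induction l with
  | nil => intro s; simp [PySem.Set.update]
  | cons x xs ih =>
    intro s
    rw [List.foldl_cons, PySem.Set.update_cons]
    have hstep : stepB (s, s) x = (PySem.Set.add s x, PySem.Set.add s x) := by
      by_cases h : PySem.Set.contains s x
      · have hm : x ∈ s := (PySem.Set.contains_iff s x).mp h
        simp [stepB, hm]
      · have hm : x ∉ s := fun hx => h ((PySem.Set.contains_iff s x).mpr hx)
        simp [stepB, hm]
    rw [hstep]
    exact ih (PySem.Set.add s x)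

-- the pieces of splitOn s [','] never contain a comma
lemma splitOn_go_no_comma :
    ∀ (fuel : Nat) (l cur : List Char) (acc : List (List Char)),
      l.length ≤ fuel → (',' ∉ cur) → (∀ q ∈ acc, ',' ∉ q) →
      ∀ q ∈ PySem.Chars.splitOn.go [','] fuel l cur acc, ',' ∉ q := by
  intro fuel
  induction fuel with
  | zero =>
    intro l cur acc hl hcur hacc q hq
    have hl0 : l = [] := List.length_eq_zero_iff.mp (by omega)
    subst hl0
    simp only [PySem.Chars.splitOn.go, List.append_nil, List.mem_reverse, List.mem_cons] at hq
    rcases hq with h | h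
    · subst h; simpa using hcur
    · exact hacc q h
  | succ fuel ih =>
    intro l cur acc hl hcur hacc q hq
    cases l with
    | nil =>
      simp only [PySem.Chars.splitOn.go, List.mem_reverse, List.mem_cons] at hq
      rcases hq with h | h
      · subst h; simpa using hcur
      · exact hacc q h
    | cons c rest =>
      simp only [PySem.Chars.splitOn.go] at hq
      by_cases hp : List.isPrefixOf [','] (c :: rest) = true
      · rw [if_pos hp] at hq
        have hdrop : List.drop (List.length [',']) (c :: rest) = rest := by simp
        rw [hdrop] at hq
        refine ih rest [] (cur.reverse :: acc) (by simp at hl; omega) (by simp) ?_ q hq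
        intro p hp'
        rcases List.mem_cons.mp hp' with h | h
        · subst h; simpa using hcur
        · exact hacc p h
      · rw [if_neg hp] at hq
        have hc : c ≠ ',' := by
          intro h; subst h
          exact hp (by simp [List.isPrefixOf])
        refine ih rest (c :: cur) acc (by simp at hl; omega) ?_ hacc q hq
        simp only [List.mem_cons, not_or]
        exact ⟨fun h => hc h.symm, hcur⟩

lemma splitOn_no_comma (l : List Char) :
    ∀ q ∈ PySem.Chars.splitOn l [','], ',' ∉ q := by
  intro q hq
  exact splitOn_go_no_comma (l.length + 1) l [] [] (by omega) (by simp) (by simp) q hq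

-- strip never introduces characters
lemma mem_strip_subset (c : Char) (l : List Char) (h : c ∈ PySem.Chars.strip l) : c ∈ l := by
  simp only [PySem.Chars.strip, PySem.Chars.rstrip, PySem.Chars.lstrip] at h
  rw [List.mem_reverse] at h
  have h2 := (List.dropWhile_sublist (l := (List.dropWhile PySem.Chars.isspace l).reverse)
    (p := PySem.Chars.isspace)).mem h
  rw [List.mem_reverse] at h2
  exact (List.dropWhile_sublist (l := l) (p := PySem.Chars.isspace)).mem h2

-- every stripped piece of locale.split(',') is comma-free
lemma piece_no_comma (locale : String) (x : String)
    (hx : x ∈ (PySem.Str.split? locale ",").getD []) :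
    PySem.Str.isIn "," (PySem.Str.strip x) = false := by
  have hmap := PySem.Str.split?_map locale ","
  have hsep : ("," : String).toList = [','] := by decide
  rw [hsep] at hmap
  simp only [PySem.Chars.split?, List.isEmpty_iff] at hmap
  rw [if_neg (by simp)] at hmap
  cases hs : PySem.Str.split? locale "," with
  | none => rw [hs] at hmap; simp at hmap
  | some pieces =>
    rw [hs] at hmap
    simp only [Option.map_some, Option.some.injEq] at hmap
    rw [hs] at hx
    simp only [Option.getD_some] at hx
    have hxl : x.toList ∈ PySem.Chars.splitOn locale.toList [','] := by
      rw [← hmap]; exact List.mem_map_of_mem hx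
    have hnc : ',' ∉ x.toList := splitOn_no_comma locale.toList x.toList hxl
    rw [PySem.Str.isIn_eq, PySem.Chars.isIn_eq_false_iff, hsep]
    intro hinf
    have hmem : ',' ∈ (PySem.Str.strip x).toList := (List.singleton_infix_iff _ _).mp hinf
    rw [PySem.Str.toList_strip] at hmem
    exact hnc (mem_strip_subset ',' x.toList hmem)

-- the ports agree on comma-free strings, at any positive fuel
lemma noComma_eq (fuel : Nat) (s : String) (h : PySem.Str.isIn "," s = false) :
    locale_lookupsF (fuel+1) s = locale_lookups_altF (fuel+1) s := by
  simp only [locale_lookupsF, locale_lookups_altF, h, Bool.false_eq_true, if_false]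
  exact single_branch_eq ((PySem.Str.split? s "-").getD [])

-- a string containing ',' is nonempty
lemma length_pos_of_comma (s : String) (h : PySem.Str.isIn "," s = true) :
    1 ≤ s.toList.length := by
  rw [PySem.Str.isIn_eq, PySem.Chars.isIn_iff_infix] at h
  have hsep : ("," : String).toList = [','] := by decide
  rw [hsep] at h
  have hm : ',' ∈ s.toList := (List.singleton_infix_iff _ _).mp h
  cases hl : s.toList with
  | nil => rw [hl] at hm; simp at hm
  | cons a l => simp

-- ===== VERDICT (by name: the statement is the Claim_ definition above) =====
theorem locale_lookups_spec : Claim_equal_locale_lookups := by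
  intro locale _
  unfold Spec_locale_lookups locale_lookups locale_lookups_alt
  by_cases h : PySem.Str.isIn "," locale = true
  · simp only [locale_lookupsF, locale_lookups_altF, h, if_pos]
    -- A side: fold-append over mapped pieces = flatMap
    rw [PySem.List.foldl_append_eq_flatMap (fun x => x), List.nil_append, List.flatMap_id',
      List.flatten_eq_flatMap, List.flatMap_map]
    -- B side: nested fold = fold over the flattened stream
    rw [show (((PySem.Str.split? locale ",").getD []).foldl
          (fun st piece =>
            (locale_lookups_altF locale.toList.length (PySem.Str.strip piece)).foldl stepB st)
          (PySem.Set.empty, []))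
        = (((PySem.Str.split? locale ",").getD []).flatMap
            (fun piece => locale_lookups_altF locale.toList.length (PySem.Str.strip piece))).foldl
            stepB (PySem.Set.empty, []) from by
      rw [List.flatMap_def, List.foldl_flatten, List.foldl_map]]
    rw [show ((PySem.Set.empty : PySem.Set String), ([] : List String))
        = (([] : List String), ([] : List String)) from by rw [PySem.Set.empty_eq]]
    rw [foldB_dedup _ []]
    rw [PySem.List.dedup_eq_ofList, PySem.Set.ofList_eq_foldl, ← PySem.Set.update_eq_foldl]
    -- both sides are now Set.update [] of a flatMap; the piecewise functions agree
    have hpieces : ∀ x ∈ (PySem.Str.split? locale ",").getD [],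
        locale_lookupsF locale.toList.length (PySem.Str.strip x)
          = locale_lookups_altF locale.toList.length (PySem.Str.strip x) := by
      intro x hx
      obtain ⟨m, hm⟩ : ∃ m, locale.toList.length = m + 1 := by
        have hlen := length_pos_of_comma locale h
        exact ⟨locale.toList.length - 1, by omega⟩
      rw [hm]
      exact noComma_eq m _ (piece_no_comma locale x hx)
    rw [List.flatMap_map]
    exact congrArg (PySem.Set.update [])
      (List.flatMap_congr (fun x hx => by simpa [Function.comp] using hpieces x hx))
  · have hf : PySem.Str.isIn "," locale = false := by simpa using h
    exact noComma_eq locale.toList.length locale hf
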